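-- pv_equiv track=rewrite | github.com/mohamedx500/medical-ai-assignment | backend/services/clips_engine.py | _simulate_clips
-- ===== SOURCE A (Python) =====
-- def _simulate_clips(
--     name: str, age: int, gender: str, symptoms: list[str], severity: str
-- ) -> list[dict]:
--     """Simulated CLIPS output for development without clipspy installed."""
--     results = []
--
--     symptom_set = set(s.lower().replace(" ", "-") for s in symptoms)
--
--     # Simulated rule matching
--     if {"fever", "cough", "fatigue"} & symptom_set == {"fever", "cough", "fatigue"}:
--         results.append(
--             {
--                 "condition": "Influenza (Flu)",
--                 "confidence": "High",
--                 "recommendation": "Rest, hydration, antiviral medication (e.g., Oseltamivir). Monitor temperature. Seek emergency care if breathing difficulty develops.",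
--                 "urgency": "Moderate",
--             }
--         )
--
--     if {"chest-pain", "shortness-of-breath"} & symptom_set == {
--         "chest-pain",
--         "shortness-of-breath",
--     }:
--         results.append(
--             {
--                 "condition": "Possible Cardiac Event",
--                 "confidence": "High",
--                 "recommendation": "Immediate medical attention required. Call emergency services. Do not exert yourself. Take aspirin if not allergic.",
--                 "urgency": "Critical",
--             }
--         )
--
--     if {"headache", "nausea", "light-sensitivity"} & symptom_set == {
--         "headache",
--         "nausea",
--         "light-sensitivity",
--     }:
--         results.append(
--             {
--                 "condition": "Migraine",
--                 "confidence": "Moderate",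
--                 "recommendation": "Rest in a dark, quiet room. Over-the-counter pain relievers (ibuprofen, acetaminophen). Consider prescription triptans if recurrent.",
--                 "urgency": "Low",
--             }
--         )
--
--     if {"joint-pain", "swelling", "morning-stiffness"} & symptom_set == {
--         "joint-pain",
--         "swelling",
--         "morning-stiffness",
--     }:
--         results.append(
--             {
--                 "condition": "Rheumatoid Arthritis",
--                 "confidence": "Moderate",
--                 "recommendation": "Anti-inflammatory medication (NSAIDs). Physical therapy. Consult a rheumatologist for disease-modifying therapy.",
--                 "urgency": "Moderate",
--             }
--         )
--
--     if {"frequent-urination", "excessive-thirst", "fatigue"} & symptom_set == {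
--         "frequent-urination",
--         "excessive-thirst",
--         "fatigue",
--     }:
--         results.append(
--             {
--                 "condition": "Type 2 Diabetes Mellitus",
--                 "confidence": "Moderate",
--                 "recommendation": "Blood glucose testing recommended. Dietary modifications, regular exercise. Consult endocrinologist for HbA1c testing.",
--                 "urgency": "Moderate",
--             }
--         )
--
--     if not results:
--         results.append(
--             {
--                 "condition": "General Assessment Required",
--                 "confidence": "Low",
--                 "recommendation": "Symptoms do not match a specific pattern. Comprehensive physical examination and laboratory workup recommended.",
--                 "urgency": "Low",
--             }
--         )
--
--     return results
-- ===== SOURCE B (Python) =====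
-- def _simulate_clips(
--     name: str, age: int, gender: str, symptoms: list[str], severity: str
-- ) -> list[dict]:
--     """Inverted-index rewrite: iterate over the patient's symptoms, counting per-rule
--     hits through a symptom->rule-ids index; a rule fires when its hit count reaches
--     the number of symptoms it requires. No per-rule subset test is performed."""
--     index = {
--         "fever": (0,), "cough": (0,), "fatigue": (0, 4),
--         "chest-pain": (1,), "shortness-of-breath": (1,),
--         "headache": (2,), "nausea": (2,), "light-sensitivity": (2,),
--         "joint-pain": (3,), "swelling": (3,), "morning-stiffness": (3,),
--         "frequent-urination": (4,), "excessive-thirst": (4,),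
--     }
--     needed = [3, 2, 3, 3, 3]
--
--     hits = {}
--     for s in set(s.lower().replace(" ", "-") for s in symptoms):
--         for rid in index.get(s, ()):
--             hits[rid] = hits.get(rid, 0) + 1
--
--     table = [
--         {
--             "condition": "Influenza (Flu)",
--             "confidence": "High",
--             "recommendation": "Rest, hydration, antiviral medication (e.g., Oseltamivir). Monitor temperature. Seek emergency care if breathing difficulty develops.",
--             "urgency": "Moderate",
--         },
--         {
--             "condition": "Possible Cardiac Event",
--             "confidence": "High",
--             "recommendation": "Immediate medical attention required. Call emergency services. Do not exert yourself. Take aspirin if not allergic.",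
--             "urgency": "Critical",
--         },
--         {
--             "condition": "Migraine",
--             "confidence": "Moderate",
--             "recommendation": "Rest in a dark, quiet room. Over-the-counter pain relievers (ibuprofen, acetaminophen). Consider prescription triptans if recurrent.",
--             "urgency": "Low",
--         },
--         {
--             "condition": "Rheumatoid Arthritis",
--             "confidence": "Moderate",
--             "recommendation": "Anti-inflammatory medication (NSAIDs). Physical therapy. Consult a rheumatologist for disease-modifying therapy.",
--             "urgency": "Moderate",
--         },
--         {
--             "condition": "Type 2 Diabetes Mellitus",
--             "confidence": "Moderate",
--             "recommendation": "Blood glucose testing recommended. Dietary modifications, regular exercise. Consult endocrinologist for HbA1c testing.",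
--             "urgency": "Moderate",
--         },
--     ]
--
--     results = [table[rid] for rid in range(5) if hits.get(rid, 0) == needed[rid]]
--
--     if not results:
--         results.append(
--             {
--                 "condition": "General Assessment Required",
--                 "confidence": "Low",
--                 "recommendation": "Symptoms do not match a specific pattern. Comprehensive physical examination and laboratory workup recommended.",
--                 "urgency": "Low",
--             }
--         )
--
--     return results
-- ===== Notes on version B (the rewrite author's own statement) =====
-- stated objective: alternative
-- what changed: Replaced A's five per-rule set-intersection subset tests with an inverted index: one pass over the patient's normalized symptom set increments per-rule hit counters via a symptom->rule-ids map, and a rule fires exactly when its counter reaches the number of symptoms it requires.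
import Mathlib
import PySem

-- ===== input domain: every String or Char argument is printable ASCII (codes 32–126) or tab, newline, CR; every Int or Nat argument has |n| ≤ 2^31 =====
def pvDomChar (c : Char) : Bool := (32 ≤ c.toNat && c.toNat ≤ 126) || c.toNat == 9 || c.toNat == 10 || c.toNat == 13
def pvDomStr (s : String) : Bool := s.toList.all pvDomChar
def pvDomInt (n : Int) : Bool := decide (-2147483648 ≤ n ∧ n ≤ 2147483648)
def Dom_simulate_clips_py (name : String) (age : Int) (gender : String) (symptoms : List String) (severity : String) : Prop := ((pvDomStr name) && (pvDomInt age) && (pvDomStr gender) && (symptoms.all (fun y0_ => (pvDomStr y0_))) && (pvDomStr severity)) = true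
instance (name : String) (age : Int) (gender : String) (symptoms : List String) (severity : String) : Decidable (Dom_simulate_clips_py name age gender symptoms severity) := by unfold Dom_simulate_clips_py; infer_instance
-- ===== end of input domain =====

-- B replaces A's five per-rule subset tests by an inverted index (symptom -> rule ids) driving
-- per-rule hit counters; a rule fires when its counter reaches its requirement count (objective: alternative).

-- ===== PORT A =====
def simulate_clips_py (name : String) (age : Int) (gender : String) (symptoms : List String) (severity : String) : List (List (String × String)) :=
  let symptom_set : PySem.Set String := PySem.Set.ofList (symptoms.map (fun s => PySem.Str.replace (PySem.Str.lower s) " " "-"))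
  let results : List (List (String × String)) := []
  let results := if PySem.Set.equal (PySem.Set.inter (PySem.Set.ofList ["fever", "cough", "fatigue"]) symptom_set) (PySem.Set.ofList ["fever", "cough", "fatigue"]) then results ++ [[("condition", "Influenza (Flu)"), ("confidence", "High"), ("recommendation", "Rest, hydration, antiviral medication (e.g., Oseltamivir). Monitor temperature. Seek emergency care if breathing difficulty develops."), ("urgency", "Moderate")]] else results
  let results := if PySem.Set.equal (PySem.Set.inter (PySem.Set.ofList ["chest-pain", "shortness-of-breath"]) symptom_set) (PySem.Set.ofList ["chest-pain", "shortness-of-breath"]) then results ++ [[("condition", "Possible Cardiac Event"), ("confidence", "High"), ("recommendation", "Immediate medical attention required. Call emergency services. Do not exert yourself. Take aspirin if not allergic."), ("urgency", "Critical")]] else results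
  let results := if PySem.Set.equal (PySem.Set.inter (PySem.Set.ofList ["headache", "nausea", "light-sensitivity"]) symptom_set) (PySem.Set.ofList ["headache", "nausea", "light-sensitivity"]) then results ++ [[("condition", "Migraine"), ("confidence", "Moderate"), ("recommendation", "Rest in a dark, quiet room. Over-the-counter pain relievers (ibuprofen, acetaminophen). Consider prescription triptans if recurrent."), ("urgency", "Low")]] else results
  let results := if PySem.Set.equal (PySem.Set.inter (PySem.Set.ofList ["joint-pain", "swelling", "morning-stiffness"]) symptom_set) (PySem.Set.ofList ["joint-pain", "swelling", "morning-stiffness"]) then results ++ [[("condition", "Rheumatoid Arthritis"), ("confidence", "Moderate"), ("recommendation", "Anti-inflammatory medication (NSAIDs). Physical therapy. Consult a rheumatologist for disease-modifying therapy."), ("urgency", "Moderate")]] else results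
  let results := if PySem.Set.equal (PySem.Set.inter (PySem.Set.ofList ["frequent-urination", "excessive-thirst", "fatigue"]) symptom_set) (PySem.Set.ofList ["frequent-urination", "excessive-thirst", "fatigue"]) then results ++ [[("condition", "Type 2 Diabetes Mellitus"), ("confidence", "Moderate"), ("recommendation", "Blood glucose testing recommended. Dietary modifications, regular exercise. Consult endocrinologist for HbA1c testing."), ("urgency", "Moderate")]] else results
  let results := if results = [] then results ++ [[("condition", "General Assessment Required"), ("confidence", "Low"), ("recommendation", "Symptoms do not match a specific pattern. Comprehensive physical examination and laboratory workup recommended."), ("urgency", "Low")]] else results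
  results

-- ===== PORT B =====
-- B-side helpers: the constant tables of Source B (inverted index, requirement counts, result rows)
def pvIdx : PySem.Dict String (List Int) := PySem.Dict.mk
  [("fever", [0]), ("cough", [0]), ("fatigue", [0, 4]),
   ("chest-pain", [1]), ("shortness-of-breath", [1]),
   ("headache", [2]), ("nausea", [2]), ("light-sensitivity", [2]),
   ("joint-pain", [3]), ("swelling", [3]), ("morning-stiffness", [3]),
   ("frequent-urination", [4]), ("excessive-thirst", [4])]

def pvNeeded : List Int := [3, 2, 3, 3, 3]

def pvTable : List (List (String × String)) :=
  [ [("condition", "Influenza (Flu)"), ("confidence", "High"), ("recommendation", "Rest, hydration, antiviral medication (e.g., Oseltamivir). Monitor temperature. Seek emergency care if breathing difficulty develops."), ("urgency", "Moderate")],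
    [("condition", "Possible Cardiac Event"), ("confidence", "High"), ("recommendation", "Immediate medical attention required. Call emergency services. Do not exert yourself. Take aspirin if not allergic."), ("urgency", "Critical")],
    [("condition", "Migraine"), ("confidence", "Moderate"), ("recommendation", "Rest in a dark, quiet room. Over-the-counter pain relievers (ibuprofen, acetaminophen). Consider prescription triptans if recurrent."), ("urgency", "Low")],
    [("condition", "Rheumatoid Arthritis"), ("confidence", "Moderate"), ("recommendation", "Anti-inflammatory medication (NSAIDs). Physical therapy. Consult a rheumatologist for disease-modifying therapy."), ("urgency", "Moderate")],
    [("condition", "Type 2 Diabetes Mellitus"), ("confidence", "Moderate"), ("recommendation", "Blood glucose testing recommended. Dietary modifications, regular exercise. Consult endocrinologist for HbA1c testing."), ("urgency", "Moderate")] ]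

def simulate_clips_py_alt (name : String) (age : Int) (gender : String) (symptoms : List String) (severity : String) : List (List (String × String)) :=
  -- hits: for s in normalized set: for rid in index.get(s, ()): hits[rid] = hits.get(rid, 0) + 1
  -- (the Set is consumed only into a Dict that is looked up afterwards, so iteration order is immaterial)
  let hits : PySem.Dict Int Int :=
    (PySem.Set.ofList (symptoms.map (fun s => PySem.Str.replace (PySem.Str.lower s) " " "-"))).foldl
      (fun h s => (pvIdx.getD s []).foldl (fun h rid => h.insert rid (h.getD rid 0 + 1)) h)
      PySem.Dict.empty
  let results : List (List (String × String)) :=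
    ((PySem.List.pyRange 0 5 1).filter
        (fun rid => PySem.Dict.getD hits rid 0 == PySem.List.pyGetD pvNeeded rid 0)).map
      (fun rid => PySem.List.pyGetD pvTable rid [])
  if results = [] then results ++ [[("condition", "General Assessment Required"), ("confidence", "Low"), ("recommendation", "Symptoms do not match a specific pattern. Comprehensive physical examination and laboratory workup recommended."), ("urgency", "Low")]] else results

-- ===== PRECONDITION & SPEC =====
def Spec_simulate_clips_py (name : String) (age : Int) (gender : String) (symptoms : List String) (severity : String) (out : List (List (String × String))) : Prop := out = simulate_clips_py_alt name age gender symptoms severity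
instance (name : String) (age : Int) (gender : String) (symptoms : List String) (severity : String) (out : List (List (String × String))) : Decidable (Spec_simulate_clips_py name age gender symptoms severity out) := by unfold Spec_simulate_clips_py; infer_instance

-- ===== CLAIM (what is proved, stated in full; the proofs are below) =====
def Claim_equal_simulate_clips_py : Prop := ∀ (name : String) (age : Int) (gender : String) (symptoms : List String) (severity : String), Dom_simulate_clips_py name age gender symptoms severity → Spec_simulate_clips_py name age gender symptoms severity (simulate_clips_py name age gender symptoms severity)

-- ===== LEMMAS AND PROOFS =====

-- pvIdx.getD unfolded to an if-chain over the 13 keys (for an abstract lookup key).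
theorem pvIdx_getD (x : String) : pvIdx.getD x []
    = if "fever" = x then [0] else if "cough" = x then [0] else if "fatigue" = x then [0,4]
      else if "chest-pain" = x then [1] else if "shortness-of-breath" = x then [1]
      else if "headache" = x then [2] else if "nausea" = x then [2] else if "light-sensitivity" = x then [2]
      else if "joint-pain" = x then [3] else if "swelling" = x then [3] else if "morning-stiffness" = x then [3]
      else if "frequent-urination" = x then [4] else if "excessive-thirst" = x then [4] else [] := by
  simp only [pvIdx, PySem.Dict.getD_eq_get?_getD, PySem.Dict.get?_mk_cons, beq_iff_eq,
    apply_ite (fun o : Option (List Int) => o.getD []), Option.getD_some]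
  rfl

-- Every index entry is a duplicate-free list of rule ids.
theorem pvIdx_nodup (x : String) : (pvIdx.getD x []).Nodup := by
  rw [pvIdx_getD]
  by_cases h0 : "fever" = x
  · subst h0; decide
  rw [if_neg h0]
  by_cases h1 : "cough" = x
  · subst h1; decide
  rw [if_neg h1]
  by_cases h2 : "fatigue" = x
  · subst h2; decide
  rw [if_neg h2]
  by_cases h3 : "chest-pain" = x
  · subst h3; decide
  rw [if_neg h3]
  by_cases h4 : "shortness-of-breath" = x
  · subst h4; decide
  rw [if_neg h4]
  by_cases h5 : "headache" = x
  · subst h5; decide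
  rw [if_neg h5]
  by_cases h6 : "nausea" = x
  · subst h6; decide
  rw [if_neg h6]
  by_cases h7 : "light-sensitivity" = x
  · subst h7; decide
  rw [if_neg h7]
  by_cases h8 : "joint-pain" = x
  · subst h8; decide
  rw [if_neg h8]
  by_cases h9 : "swelling" = x
  · subst h9; decide
  rw [if_neg h9]
  by_cases h10 : "morning-stiffness" = x
  · subst h10; decide
  rw [if_neg h10]
  by_cases h11 : "frequent-urination" = x
  · subst h11; decide
  rw [if_neg h11]
  by_cases h12 : "excessive-thirst" = x
  · subst h12; decide
  rw [if_neg h12]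
  decide

-- Rule id i lies in x's index entry exactly when x is one of rule i's required symptoms.
theorem pvIdx_mem0 (x : String) :
    decide ((0:Int) ∈ pvIdx.getD x []) = decide (x ∈ (["fever", "cough", "fatigue"] : List String)) := by
  rw [pvIdx_getD]
  by_cases h0 : "fever" = x
  · subst h0; decide
  rw [if_neg h0]
  by_cases h1 : "cough" = x
  · subst h1; decide
  rw [if_neg h1]
  by_cases h2 : "fatigue" = x
  · subst h2; decide
  rw [if_neg h2]
  by_cases h3 : "chest-pain" = x
  · subst h3; decide
  rw [if_neg h3]
  by_cases h4 : "shortness-of-breath" = x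
  · subst h4; decide
  rw [if_neg h4]
  by_cases h5 : "headache" = x
  · subst h5; decide
  rw [if_neg h5]
  by_cases h6 : "nausea" = x
  · subst h6; decide
  rw [if_neg h6]
  by_cases h7 : "light-sensitivity" = x
  · subst h7; decide
  rw [if_neg h7]
  by_cases h8 : "joint-pain" = x
  · subst h8; decide
  rw [if_neg h8]
  by_cases h9 : "swelling" = x
  · subst h9; decide
  rw [if_neg h9]
  by_cases h10 : "morning-stiffness" = x
  · subst h10; decide
  rw [if_neg h10]
  by_cases h11 : "frequent-urination" = x
  · subst h11; decide
  rw [if_neg h11]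
  by_cases h12 : "excessive-thirst" = x
  · subst h12; decide
  rw [if_neg h12]
  simp_all [eq_comm]

theorem pvIdx_mem1 (x : String) :
    decide ((1:Int) ∈ pvIdx.getD x []) = decide (x ∈ (["chest-pain", "shortness-of-breath"] : List String)) := by
  rw [pvIdx_getD]
  by_cases h0 : "fever" = x
  · subst h0; decide
  rw [if_neg h0]
  by_cases h1 : "cough" = x
  · subst h1; decide
  rw [if_neg h1]
  by_cases h2 : "fatigue" = x
  · subst h2; decide
  rw [if_neg h2]
  by_cases h3 : "chest-pain" = x
  · subst h3; decide
  rw [if_neg h3]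
  by_cases h4 : "shortness-of-breath" = x
  · subst h4; decide
  rw [if_neg h4]
  by_cases h5 : "headache" = x
  · subst h5; decide
  rw [if_neg h5]
  by_cases h6 : "nausea" = x
  · subst h6; decide
  rw [if_neg h6]
  by_cases h7 : "light-sensitivity" = x
  · subst h7; decide
  rw [if_neg h7]
  by_cases h8 : "joint-pain" = x
  · subst h8; decide
  rw [if_neg h8]
  by_cases h9 : "swelling" = x
  · subst h9; decide
  rw [if_neg h9]
  by_cases h10 : "morning-stiffness" = x
  · subst h10; decide
  rw [if_neg h10]
  by_cases h11 : "frequent-urination" = x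
  · subst h11; decide
  rw [if_neg h11]
  by_cases h12 : "excessive-thirst" = x
  · subst h12; decide
  rw [if_neg h12]
  simp_all [eq_comm]

theorem pvIdx_mem2 (x : String) :
    decide ((2:Int) ∈ pvIdx.getD x []) = decide (x ∈ (["headache", "nausea", "light-sensitivity"] : List String)) := by
  rw [pvIdx_getD]
  by_cases h0 : "fever" = x
  · subst h0; decide
  rw [if_neg h0]
  by_cases h1 : "cough" = x
  · subst h1; decide
  rw [if_neg h1]
  by_cases h2 : "fatigue" = x
  · subst h2; decide
  rw [if_neg h2]
  by_cases h3 : "chest-pain" = x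
  · subst h3; decide
  rw [if_neg h3]
  by_cases h4 : "shortness-of-breath" = x
  · subst h4; decide
  rw [if_neg h4]
  by_cases h5 : "headache" = x
  · subst h5; decide
  rw [if_neg h5]
  by_cases h6 : "nausea" = x
  · subst h6; decide
  rw [if_neg h6]
  by_cases h7 : "light-sensitivity" = x
  · subst h7; decide
  rw [if_neg h7]
  by_cases h8 : "joint-pain" = x
  · subst h8; decide
  rw [if_neg h8]
  by_cases h9 : "swelling" = x
  · subst h9; decide
  rw [if_neg h9]
  by_cases h10 : "morning-stiffness" = x
  · subst h10; decide
  rw [if_neg h10]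
  by_cases h11 : "frequent-urination" = x
  · subst h11; decide
  rw [if_neg h11]
  by_cases h12 : "excessive-thirst" = x
  · subst h12; decide
  rw [if_neg h12]
  simp_all [eq_comm]

theorem pvIdx_mem3 (x : String) :
    decide ((3:Int) ∈ pvIdx.getD x []) = decide (x ∈ (["joint-pain", "swelling", "morning-stiffness"] : List String)) := by
  rw [pvIdx_getD]
  by_cases h0 : "fever" = x
  · subst h0; decide
  rw [if_neg h0]
  by_cases h1 : "cough" = x
  · subst h1; decide
  rw [if_neg h1]
  by_cases h2 : "fatigue" = x
  · subst h2; decide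
  rw [if_neg h2]
  by_cases h3 : "chest-pain" = x
  · subst h3; decide
  rw [if_neg h3]
  by_cases h4 : "shortness-of-breath" = x
  · subst h4; decide
  rw [if_neg h4]
  by_cases h5 : "headache" = x
  · subst h5; decide
  rw [if_neg h5]
  by_cases h6 : "nausea" = x
  · subst h6; decide
  rw [if_neg h6]
  by_cases h7 : "light-sensitivity" = x
  · subst h7; decide
  rw [if_neg h7]
  by_cases h8 : "joint-pain" = x
  · subst h8; decide
  rw [if_neg h8]
  by_cases h9 : "swelling" = x
  · subst h9; decide
  rw [if_neg h9]
  by_cases h10 : "morning-stiffness" = x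
  · subst h10; decide
  rw [if_neg h10]
  by_cases h11 : "frequent-urination" = x
  · subst h11; decide
  rw [if_neg h11]
  by_cases h12 : "excessive-thirst" = x
  · subst h12; decide
  rw [if_neg h12]
  simp_all [eq_comm]

theorem pvIdx_mem4 (x : String) :
    decide ((4:Int) ∈ pvIdx.getD x []) = decide (x ∈ (["frequent-urination", "excessive-thirst", "fatigue"] : List String)) := by
  rw [pvIdx_getD]
  by_cases h0 : "fever" = x
  · subst h0; decide
  rw [if_neg h0]
  by_cases h1 : "cough" = x
  · subst h1; decide
  rw [if_neg h1]
  by_cases h2 : "fatigue" = x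
  · subst h2; decide
  rw [if_neg h2]
  by_cases h3 : "chest-pain" = x
  · subst h3; decide
  rw [if_neg h3]
  by_cases h4 : "shortness-of-breath" = x
  · subst h4; decide
  rw [if_neg h4]
  by_cases h5 : "headache" = x
  · subst h5; decide
  rw [if_neg h5]
  by_cases h6 : "nausea" = x
  · subst h6; decide
  rw [if_neg h6]
  by_cases h7 : "light-sensitivity" = x
  · subst h7; decide
  rw [if_neg h7]
  by_cases h8 : "joint-pain" = x
  · subst h8; decide
  rw [if_neg h8]
  by_cases h9 : "swelling" = x
  · subst h9; decide
  rw [if_neg h9]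
  by_cases h10 : "morning-stiffness" = x
  · subst h10; decide
  rw [if_neg h10]
  by_cases h11 : "frequent-urination" = x
  · subst h11; decide
  rw [if_neg h11]
  by_cases h12 : "excessive-thirst" = x
  · subst h12; decide
  rw [if_neg h12]
  simp_all [eq_comm]


-- The inner loop ('for rid in index[s]') bumps each counter of a duplicate-free id list by one.
theorem inner_count (L : List Int) (hL : L.Nodup) (d : PySem.Dict Int Int) (i : Int) :
    (L.foldl (fun h rid => h.insert rid (h.getD rid 0 + 1)) d).getD i 0
      = d.getD i 0 + (if i ∈ L then 1 else 0) := by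
  induction L generalizing d with
  | nil => simp
  | cons r L ih =>
    simp only [List.foldl_cons]
    rw [ih (List.nodup_cons.mp hL).2, PySem.Dict.getD_insert]
    by_cases hir : i = r
    · subst hir
      have hnotin : i ∉ L := (List.nodup_cons.mp hL).1
      simp [hnotin]
    · simp [hir]

-- The counting loop as a whole: hits[i] counts the symptoms whose index entry contains rule id i.
theorem hits_getD (l : List String) (d : PySem.Dict Int Int) (i : Int) :
    (l.foldl (fun h s => (pvIdx.getD s []).foldl (fun h rid => h.insert rid (h.getD rid 0 + 1)) h) d).getD i 0
      = d.getD i 0 + (l.countP (fun x => decide (i ∈ pvIdx.getD x [])) : Int) := by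
  induction l generalizing d with
  | nil => simp
  | cons x l ih =>
    simp only [List.foldl_cons, List.countP_cons]
    rw [ih, inner_count _ (pvIdx_nodup x)]
    by_cases h : i ∈ pvIdx.getD x []
    · simp only [h, decide_true, if_pos, ite_true]
      push_cast
      ring
    · simp [h]

-- Counting, in a duplicate-free list, the elements that belong to a duplicate-free req
-- equals counting, in req, the elements that belong to the list (both are |l ∩ req|).
theorem countP_mem_eq (l req : List String) (hl : l.Nodup) (hr : req.Nodup) :
    l.countP (fun x => decide (x ∈ req)) = req.countP (fun r => decide (r ∈ l)) := by
  rw [List.countP_eq_length_filter, List.countP_eq_length_filter]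
  rw [← List.toFinset_card_of_nodup (hl.filter _), ← List.toFinset_card_of_nodup (hr.filter _)]
  congr 1
  rw [List.toFinset_filter, List.toFinset_filter]
  ext a
  simp only [Finset.mem_filter, List.mem_toFinset, decide_eq_true_eq]
  tauto

-- 'hit count == number of required symptoms' is 'every required symptom is present'.
theorem count_all (R l : List String) (n : Int) (hn : n = R.length) :
    ((R.countP (fun r => decide (r ∈ l)) : Int) == n) = R.all (fun r => decide (r ∈ l)) := by
  subst hn
  rw [Bool.eq_iff_iff, beq_iff_eq]
  simp [List.countP_eq_length, List.all_eq_true]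

-- A's test '{…} & symptom_set == {…}' is 'every required symptom is in symptom_set'.
theorem Acond (R s : List String) :
    PySem.Set.equal (PySem.Set.inter (PySem.Set.ofList R) s) (PySem.Set.ofList R)
      = R.all (fun r => decide (r ∈ s)) := by
  rw [Bool.eq_iff_iff, PySem.Set.equal_iff]
  simp only [PySem.Set.mem_inter, PySem.Set.mem_ofList, List.all_eq_true, decide_eq_true_eq]
  constructor
  · intro h r hr
    exact ((h r).mpr hr).2
  · intro h x
    exact ⟨fun hx => hx.1, fun hx => ⟨hx, h x hx⟩⟩

-- ===== VERDICT (by name: the statement is the Claim_ definition above) =====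
theorem simulate_clips_py_spec : Claim_equal_simulate_clips_py := by
  intro name age gender symptoms severity _
  unfold Spec_simulate_clips_py simulate_clips_py simulate_clips_py_alt
  set l : List String := PySem.Set.ofList (symptoms.map (fun s => PySem.Str.replace (PySem.Str.lower s) " " "-")) with hl
  have hnd : l.Nodup := PySem.Set.nodup_ofList _
  have hc : ∀ (i : Int) (R : List String), R.Nodup →
      (∀ x : String, decide (i ∈ pvIdx.getD x []) = decide (x ∈ R)) →
      l.countP (fun x => decide (i ∈ pvIdx.getD x [])) = R.countP (fun r => decide (r ∈ l)) := by
    intro i R hR hmem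
    rw [List.countP_congr (fun x _ => by rw [hmem x])]
    exact countP_mem_eq l R hnd hR
  have hc0 := hc 0 _ (by decide) pvIdx_mem0
  have hc1 := hc 1 _ (by decide) pvIdx_mem1
  have hc2 := hc 2 _ (by decide) pvIdx_mem2
  have hc3 := hc 3 _ (by decide) pvIdx_mem3
  have hc4 := hc 4 _ (by decide) pvIdx_mem4
  simp only [Acond, show PySem.List.pyRange 0 5 1 = [0, 1, 2, 3, 4] from rfl,
    List.filter_cons, List.filter_nil, hits_getD, PySem.Dict.getD_empty, zero_add,
    (by decide : PySem.List.pyGetD pvNeeded 0 0 = 3), (by decide : PySem.List.pyGetD pvNeeded 1 0 = 2),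
    (by decide : PySem.List.pyGetD pvNeeded 2 0 = 3), (by decide : PySem.List.pyGetD pvNeeded 3 0 = 3),
    (by decide : PySem.List.pyGetD pvNeeded 4 0 = 3),
    hc0, hc1, hc2, hc3, hc4,
    count_all ["fever", "cough", "fatigue"] l 3 (by norm_num),
    count_all ["chest-pain", "shortness-of-breath"] l 2 (by norm_num),
    count_all ["headache", "nausea", "light-sensitivity"] l 3 (by norm_num),
    count_all ["joint-pain", "swelling", "morning-stiffness"] l 3 (by norm_num),
    count_all ["frequent-urination", "excessive-thirst", "fatigue"] l 3 (by norm_num)]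
  cases hb0 : (["fever", "cough", "fatigue"] : List String).all (fun r => decide (r ∈ l)) <;>
  cases hb1 : (["chest-pain", "shortness-of-breath"] : List String).all (fun r => decide (r ∈ l)) <;>
  cases hb2 : (["headache", "nausea", "light-sensitivity"] : List String).all (fun r => decide (r ∈ l)) <;>
  cases hb3 : (["joint-pain", "swelling", "morning-stiffness"] : List String).all (fun r => decide (r ∈ l)) <;>
  cases hb4 : (["frequent-urination", "excessive-thirst", "fatigue"] : List String).all (fun r => decide (r ∈ l)) <;>
    simp only [hb0, hb1, hb2, hb3, hb4, if_true, if_false, Bool.false_eq_true, ite_true, ite_false,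
      List.map_cons, List.map_nil, List.nil_append, List.cons_append, reduceCtorEq] <;>
    rfl
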